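-- pv_equiv track=rewrite | github.com/Three-Rivers-Tech/finance_feedback_engine | finance_feedback_engine/decision_engine/policy_actions.py | build_policy_selection_adaptive_control_runtime_config_materialization_summary
-- ===== SOURCE A (Python) =====
-- from typing import Optional
--
-- def build_policy_selection_adaptive_control_runtime_config_materialization_summary(
--     adaptive_control_runtime_config_materialization_set: Optional[dict],
-- ) -> dict:
--     payload = (
--         dict(adaptive_control_runtime_config_materialization_set or {})
--         if isinstance(adaptive_control_runtime_config_materialization_set, dict)
--         else {}
--     )
--     summaries = payload.get("adaptive_control_config_patch_contract_summaries") or []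
--     valid_summaries = [summary for summary in summaries if isinstance(summary, dict)]
--     if not valid_summaries:
--         return {
--             "summary_count": 0,
--             "shadow_adaptive_control_runtime_config_materialization_count": 0,
--             "primary_cutover_adaptive_control_runtime_config_materialization_count": 0,
--             "manual_hold_adaptive_control_runtime_config_materialization_count": 0,
--             "deferred_adaptive_control_runtime_config_materialization_count": 0,
--             "adaptive_control_runtime_config_materialization_summary_version": 1,
--         }
--
--     shadow_adaptive_control_runtime_config_materialization_count = 0
--     primary_cutover_adaptive_control_runtime_config_materialization_count = 0
--     manual_hold_adaptive_control_runtime_config_materialization_count = 0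
--     deferred_adaptive_control_runtime_config_materialization_count = 0
--     comparable_summary_count = 0
--
--     for summary in valid_summaries:
--         try:
--             shadow_adaptive_control_config_patch_contract_count = int(summary.get("shadow_adaptive_control_config_patch_contract_count"))
--             primary_cutover_adaptive_control_config_patch_contract_count = int(summary.get("primary_cutover_adaptive_control_config_patch_contract_count"))
--             manual_hold_adaptive_control_config_patch_contract_count = int(summary.get("manual_hold_adaptive_control_config_patch_contract_count"))
--             deferred_adaptive_control_config_patch_contract_count = int(summary.get("deferred_adaptive_control_config_patch_contract_count"))
--             summary_count = int(summary.get("summary_count"))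
--         except (TypeError, ValueError):
--             continue
--
--         if summary_count <= 0:
--             continue
--
--         comparable_summary_count += 1
--         if primary_cutover_adaptive_control_config_patch_contract_count > 0:
--             primary_cutover_adaptive_control_runtime_config_materialization_count += 1
--         elif shadow_adaptive_control_config_patch_contract_count > 0:
--             shadow_adaptive_control_runtime_config_materialization_count += 1
--         elif manual_hold_adaptive_control_config_patch_contract_count > 0:
--             manual_hold_adaptive_control_runtime_config_materialization_count += 1
--         else:
--             deferred_adaptive_control_runtime_config_materialization_count += 1
--
--     return {
--         "summary_count": comparable_summary_count,
--         "shadow_adaptive_control_runtime_config_materialization_count": shadow_adaptive_control_runtime_config_materialization_count,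
--         "primary_cutover_adaptive_control_runtime_config_materialization_count": primary_cutover_adaptive_control_runtime_config_materialization_count,
--         "manual_hold_adaptive_control_runtime_config_materialization_count": manual_hold_adaptive_control_runtime_config_materialization_count,
--         "deferred_adaptive_control_runtime_config_materialization_count": deferred_adaptive_control_runtime_config_materialization_count,
--         "adaptive_control_runtime_config_materialization_summary_version": 1,
--     }
-- ===== SOURCE B (Python) =====
-- # B: classify each summary to an optional label once, then count labels -- simpler pipeline, no early return.
-- def build_policy_selection_adaptive_control_runtime_config_materialization_summary(
--     adaptive_control_runtime_config_materialization_set,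
-- ):
--     def classify(summary):
--         if not isinstance(summary, dict):
--             return None
--         try:
--             shadow = int(summary.get("shadow_adaptive_control_config_patch_contract_count"))
--             primary = int(summary.get("primary_cutover_adaptive_control_config_patch_contract_count"))
--             manual = int(summary.get("manual_hold_adaptive_control_config_patch_contract_count"))
--             int(summary.get("deferred_adaptive_control_config_patch_contract_count"))
--             total = int(summary.get("summary_count"))
--         except (TypeError, ValueError):
--             return None
--         if total <= 0:
--             return None
--         if primary > 0:
--             return "primary"
--         if shadow > 0:
--             return "shadow"
--         if manual > 0:
--             return "manual"
--         return "deferred"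
--
--     payload = (
--         adaptive_control_runtime_config_materialization_set
--         if isinstance(adaptive_control_runtime_config_materialization_set, dict)
--         else {}
--     )
--     summaries = payload.get("adaptive_control_config_patch_contract_summaries") or []
--     labels = [lab for lab in map(classify, summaries) if lab is not None]
--     return {
--         "summary_count": len(labels),
--         "shadow_adaptive_control_runtime_config_materialization_count": labels.count("shadow"),
--         "primary_cutover_adaptive_control_runtime_config_materialization_count": labels.count("primary"),
--         "manual_hold_adaptive_control_runtime_config_materialization_count": labels.count("manual"),
--         "deferred_adaptive_control_runtime_config_materialization_count": labels.count("deferred"),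
--         "adaptive_control_runtime_config_materialization_summary_version": 1,
--     }
-- ===== Notes on version B (the rewrite author's own statement) =====
-- stated objective: simpler
-- what changed: Replaced the five-counter accumulator loop with an empty-input early return by a classify-into-label helper plus a label-list count pipeline with no special case for empty input.
import Mathlib
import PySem

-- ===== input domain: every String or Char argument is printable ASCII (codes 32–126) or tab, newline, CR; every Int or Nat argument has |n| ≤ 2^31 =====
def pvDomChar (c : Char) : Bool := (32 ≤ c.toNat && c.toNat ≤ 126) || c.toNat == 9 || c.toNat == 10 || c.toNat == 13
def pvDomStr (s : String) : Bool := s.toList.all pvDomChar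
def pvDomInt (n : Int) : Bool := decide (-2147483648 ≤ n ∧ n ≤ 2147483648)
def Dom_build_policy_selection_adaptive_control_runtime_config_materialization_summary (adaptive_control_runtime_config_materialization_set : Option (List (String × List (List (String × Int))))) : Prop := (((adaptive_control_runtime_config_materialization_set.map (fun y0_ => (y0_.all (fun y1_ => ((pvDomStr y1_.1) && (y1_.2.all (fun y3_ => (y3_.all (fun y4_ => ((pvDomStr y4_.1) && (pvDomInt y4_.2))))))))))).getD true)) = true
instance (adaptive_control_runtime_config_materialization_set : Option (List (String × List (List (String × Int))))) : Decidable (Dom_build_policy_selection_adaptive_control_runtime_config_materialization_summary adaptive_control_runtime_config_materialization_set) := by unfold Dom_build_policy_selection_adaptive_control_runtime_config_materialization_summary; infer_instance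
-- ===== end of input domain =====

-- B replaces A's five-counter loop with empty-input early return by a classify-then-count-labels pipeline (simpler decomposition); return-value equivalence only.



-- ===== PORT A =====
-- key-string helpers (shared literal constants)
def pvKeySummaries : String := "adaptive_control_config_patch_contract_summaries"
def pvKeyShadow : String := "shadow_adaptive_control_config_patch_contract_count"
def pvKeyPrimary : String := "primary_cutover_adaptive_control_config_patch_contract_count"
def pvKeyManual : String := "manual_hold_adaptive_control_config_patch_contract_count"
def pvKeyDeferred : String := "deferred_adaptive_control_config_patch_contract_count"
def pvKeyCount : String := "summary_count"

-- A's for-loop: five integer accumulators (shadow, primary, manual, deferred, comparable);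
-- a missing key means int(None) -> TypeError -> continue
def pvALoop : List (List (String × Int)) → Int → Int → Int → Int → Int → (Int × Int × Int × Int × Int)
  | [], sh, pr, mh, df, cnt => (sh, pr, mh, df, cnt)
  | s :: rest, sh, pr, mh, df, cnt =>
    match List.lookup pvKeyShadow s, List.lookup pvKeyPrimary s, List.lookup pvKeyManual s,
          List.lookup pvKeyDeferred s, List.lookup pvKeyCount s with
    | some shv, some prv, some mhv, some _, some sc =>
      if sc ≤ 0 then pvALoop rest sh pr mh df cnt
      else if prv > 0 then pvALoop rest sh (pr + 1) mh df (cnt + 1)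
      else if shv > 0 then pvALoop rest (sh + 1) pr mh df (cnt + 1)
      else if mhv > 0 then pvALoop rest sh pr (mh + 1) df (cnt + 1)
      else pvALoop rest sh pr mh (df + 1) (cnt + 1)
    | _, _, _, _, _ => pvALoop rest sh pr mh df cnt

def build_policy_selection_adaptive_control_runtime_config_materialization_summary (adaptive_control_runtime_config_materialization_set : Option (List (String × List (List (String × Int))))) : List (String × Int) :=
  let payload := adaptive_control_runtime_config_materialization_set.getD []
  -- 'payload.get(key) or []': a missing key and an empty (falsy) list both give []
  let summaries := (List.lookup pvKeySummaries payload).getD []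
  -- under the type every element is a dict, so the isinstance filter keeps them all
  let valid_summaries := summaries
  if valid_summaries.isEmpty then
    [(pvKeyCount, 0),
     ("shadow_adaptive_control_runtime_config_materialization_count", 0),
     ("primary_cutover_adaptive_control_runtime_config_materialization_count", 0),
     ("manual_hold_adaptive_control_runtime_config_materialization_count", 0),
     ("deferred_adaptive_control_runtime_config_materialization_count", 0),
     ("adaptive_control_runtime_config_materialization_summary_version", 1)]
  else
    match pvALoop valid_summaries 0 0 0 0 0 with
    | (sh, pr, mh, df, cnt) =>
      [(pvKeyCount, cnt),
       ("shadow_adaptive_control_runtime_config_materialization_count", sh),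
       ("primary_cutover_adaptive_control_runtime_config_materialization_count", pr),
       ("manual_hold_adaptive_control_runtime_config_materialization_count", mh),
       ("deferred_adaptive_control_runtime_config_materialization_count", df),
       ("adaptive_control_runtime_config_materialization_summary_version", 1)]

-- ===== PORT B =====
-- B classifies one summary into an optional label (none = not comparable)
def pvClassify (s : List (String × Int)) : Option String :=
  match List.lookup pvKeyShadow s, List.lookup pvKeyPrimary s, List.lookup pvKeyManual s,
        List.lookup pvKeyDeferred s, List.lookup pvKeyCount s with
  | some shv, some prv, some mhv, some _, some sc =>
    if sc ≤ 0 then none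
    else if prv > 0 then some "primary"
    else if shv > 0 then some "shadow"
    else if mhv > 0 then some "manual"
    else some "deferred"
  | _, _, _, _, _ => none

def build_policy_selection_adaptive_control_runtime_config_materialization_summary_alt (adaptive_control_runtime_config_materialization_set : Option (List (String × List (List (String × Int))))) : List (String × Int) :=
  let payload := adaptive_control_runtime_config_materialization_set.getD []
  let summaries := (List.lookup pvKeySummaries payload).getD []
  let labels := summaries.filterMap pvClassify
  [(pvKeyCount, (labels.length : Int)),
   ("shadow_adaptive_control_runtime_config_materialization_count", (labels.count "shadow" : Int)),
   ("primary_cutover_adaptive_control_runtime_config_materialization_count", (labels.count "primary" : Int)),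
   ("manual_hold_adaptive_control_runtime_config_materialization_count", (labels.count "manual" : Int)),
   ("deferred_adaptive_control_runtime_config_materialization_count", (labels.count "deferred" : Int)),
   ("adaptive_control_runtime_config_materialization_summary_version", 1)]

-- ===== PRECONDITION & SPEC =====
def Spec_build_policy_selection_adaptive_control_runtime_config_materialization_summary (adaptive_control_runtime_config_materialization_set : Option (List (String × List (List (String × Int))))) (out : List (String × Int)) : Prop := out = build_policy_selection_adaptive_control_runtime_config_materialization_summary_alt adaptive_control_runtime_config_materialization_set
instance (adaptive_control_runtime_config_materialization_set : Option (List (String × List (List (String × Int))))) (out : List (String × Int)) : Decidable (Spec_build_policy_selection_adaptive_control_runtime_config_materialization_summary adaptive_control_runtime_config_materialization_set out) := by unfold Spec_build_policy_selection_adaptive_control_runtime_config_materialization_summary; infer_instance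

-- ===== CLAIM (what is proved, stated in full; the proofs are below) =====
def Claim_equal_build_policy_selection_adaptive_control_runtime_config_materialization_summary : Prop := ∀ (adaptive_control_runtime_config_materialization_set : Option (List (String × List (List (String × Int))))), Dom_build_policy_selection_adaptive_control_runtime_config_materialization_summary adaptive_control_runtime_config_materialization_set → Spec_build_policy_selection_adaptive_control_runtime_config_materialization_summary adaptive_control_runtime_config_materialization_set (build_policy_selection_adaptive_control_runtime_config_materialization_summary adaptive_control_runtime_config_materialization_set)

-- ===== LEMMAS AND PROOFS =====
set_option maxHeartbeats 1600000 in
lemma pvALoop_eq (xs : List (List (String × Int))) (sh pr mh df cnt : Int) :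
    pvALoop xs sh pr mh df cnt =
      (sh + ((xs.filterMap pvClassify).count "shadow" : Int),
       pr + ((xs.filterMap pvClassify).count "primary" : Int),
       mh + ((xs.filterMap pvClassify).count "manual" : Int),
       df + ((xs.filterMap pvClassify).count "deferred" : Int),
       cnt + ((xs.filterMap pvClassify).length : Int)) := by
  induction xs generalizing sh pr mh df cnt with
  | nil => simp [pvALoop]
  | cons s rest ih =>
    simp only [pvALoop, List.filterMap_cons]
    rw [pvClassify.eq_def]
    rcases h1 : List.lookup pvKeyShadow s with _ | shv <;>
    rcases h2 : List.lookup pvKeyPrimary s with _ | prv <;>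
    rcases h3 : List.lookup pvKeyManual s with _ | mhv <;>
    rcases h4 : List.lookup pvKeyDeferred s with _ | dfv <;>
    rcases h5 : List.lookup pvKeyCount s with _ | sc <;>
      simp only [h1, h2, h3, h4, h5]
    all_goals first
      | apply ih
      | (split_ifs <;> rw [ih] <;> simp [List.count_cons] <;> ring_nf <;> simp)

-- ===== VERDICT (by name: the statement is the Claim_ definition above) =====
theorem build_policy_selection_adaptive_control_runtime_config_materialization_summary_spec : Claim_equal_build_policy_selection_adaptive_control_runtime_config_materialization_summary := by
  intro x _
  unfold Spec_build_policy_selection_adaptive_control_runtime_config_materialization_summary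
  unfold build_policy_selection_adaptive_control_runtime_config_materialization_summary
  unfold build_policy_selection_adaptive_control_runtime_config_materialization_summary_alt
  dsimp only
  generalize (List.lookup pvKeySummaries (x.getD [])).getD [] = L
  cases L with
  | nil => rfl
  | cons s rest =>
    simp only [List.isEmpty_cons, if_false, Bool.false_eq_true, pvALoop_eq]
    simp
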